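-- pv_equiv track=rewrite | github.com/kedharreddy66/MENTAL-HEALTH-CHATBOT | src/mh_core/audit.py | _looks_like_people_answer
-- ===== SOURCE A (Python) =====
-- def _norm(s: str) -> str:
--     return (s or "").strip().lower()
--
-- def _looks_like_people_answer(text: str) -> bool:
--     t = _norm(text)
--     PEOPLE = [
--         "family","elder","elders","friend","friends","mate","mates","mum","mom","dad",
--         "mother","father","nan","pop","grandma","grandpa","aunty","uncle","cousin","cousins",
--         "brother","sister","siblings","partner","boyfriend","girlfriend","husband","wife",
--         "kids","children","child","son","daughter","mob","community","coach","teacher",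
--         "counsellor","counselor","worker"
--     ]
--     return any(p in t for p in PEOPLE)
-- ===== SOURCE B (Python) =====
-- _PEOPLE_WORDS = (
--     "family elder elders friend friends mate mates mum mom dad "
--     "mother father nan pop grandma grandpa aunty uncle cousin cousins "
--     "brother sister siblings partner boyfriend girlfriend husband wife "
--     "kids children child son daughter mob community coach teacher "
--     "counsellor counselor worker"
-- ).split()
--
-- def _looks_like_people_answer(text: str) -> bool:
--     t = (text or "").strip().lower()
--     # single left-to-right scan: at each position, test whether some keyword starts there
--     for i in range(len(t)):
--         for p in _PEOPLE_WORDS: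
--             if t.startswith(p, i):
--                 return True
--     return False
-- ===== Notes on version B (the rewrite author's own statement) =====
-- stated objective: alternative
-- what changed: A runs one substring search per keyword over the whole text; B keeps the keywords as one space-separated string split at startup and makes a single position-by-position scan of the normalized text, testing at each position whether some keyword starts there.
import Mathlib
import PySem

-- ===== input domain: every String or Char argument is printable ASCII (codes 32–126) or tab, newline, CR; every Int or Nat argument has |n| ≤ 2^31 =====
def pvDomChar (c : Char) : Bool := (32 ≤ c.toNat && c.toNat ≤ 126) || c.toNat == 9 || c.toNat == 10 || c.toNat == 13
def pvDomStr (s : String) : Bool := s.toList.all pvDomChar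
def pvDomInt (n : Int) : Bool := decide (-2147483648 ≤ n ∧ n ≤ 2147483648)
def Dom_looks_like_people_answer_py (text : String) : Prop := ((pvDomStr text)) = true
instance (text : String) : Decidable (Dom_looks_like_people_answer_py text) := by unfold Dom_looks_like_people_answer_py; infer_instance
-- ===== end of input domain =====

-- B keeps the keywords as one space-separated string split at startup and replaces A's
-- per-keyword substring searches by a single left-to-right scan with per-position prefix tests.

-- ===== PORT A =====
-- _norm: (s or "").strip().lower()
def pvNorm (s : String) : String :=
  PySem.Str.lower (PySem.Str.strip (if s == "" then "" else s))

-- the PEOPLE list literal of A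
def pvPeople : List String := [
  "family","elder","elders","friend","friends","mate","mates","mum","mom","dad",
  "mother","father","nan","pop","grandma","grandpa","aunty","uncle","cousin","cousins",
  "brother","sister","siblings","partner","boyfriend","girlfriend","husband","wife",
  "kids","children","child","son","daughter","mob","community","coach","teacher",
  "counsellor","counselor","worker"]

def looks_like_people_answer_py (text : String) : Bool :=
  let t := pvNorm text
  pvPeople.any (fun p => PySem.Str.isIn p t)

-- ===== PORT B =====
-- B's keyword data: one space-separated string, split (str.split()) at startup
def pvWords : List String :=
  PySem.Str.split₀ ("family elder elders friend friends mate mates mum mom dad " ++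
    "mother father nan pop grandma grandpa aunty uncle cousin cousins " ++
    "brother sister siblings partner boyfriend girlfriend husband wife " ++
    "kids children child son daughter mob community coach teacher " ++
    "counsellor counselor worker")

-- scan of Source B: for each start position (suffix) test whether some keyword is a prefix
def pvScan : List Char → Bool
  | [] => false
  | c :: rest =>
      if pvWords.any (fun p => p.toList.isPrefixOf (c :: rest)) then true
      else pvScan rest

def looks_like_people_answer_py_alt (text : String) : Bool :=
  let t := PySem.Str.lower (PySem.Str.strip (if text == "" then "" else text))
  pvScan t.toList

-- ===== PRECONDITION & SPEC =====
def Spec_looks_like_people_answer_py (text : String) (out : Bool) : Prop := out = looks_like_people_answer_py_alt text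
instance (text : String) (out : Bool) : Decidable (Spec_looks_like_people_answer_py text out) := by unfold Spec_looks_like_people_answer_py; infer_instance

-- ===== CLAIM (what is proved, stated in full; the proofs are below) =====
def Claim_equal_looks_like_people_answer_py : Prop := ∀ (text : String), Dom_looks_like_people_answer_py text → Spec_looks_like_people_answer_py text (looks_like_people_answer_py text)

-- ===== LEMMAS AND PROOFS =====

-- B's split keyword string yields exactly A's keyword list
set_option maxRecDepth 4000 in
lemma pvWords_eq : pvWords = pvPeople := by decide

-- B's scan succeeds iff some keyword is a prefix of some suffix of the text
lemma pvScan_iff (cs : List Char) :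
    pvScan cs = true ↔ ∃ j, ∃ p ∈ pvPeople, p.toList <+: cs.drop j := by
  induction cs with
  | nil =>
      simp only [pvScan, List.drop_nil]
      constructor
      · intro h; exact absurd h (by decide)
      · rintro ⟨j, p, hp, hpre⟩
        have hne : p.toList ≠ [] := by
          fin_cases hp <;> decide
        exact absurd (List.prefix_nil.mp hpre) hne
  | cons c rest ih =>
      simp only [pvScan, pvWords_eq]
      split
      · rename_i h
        simp only [List.any_eq_true, List.isPrefixOf_iff_prefix] at h
        obtain ⟨p, hp, hpre⟩ := h
        simp only [true_iff]
        exact ⟨0, p, hp, by simpa using hpre⟩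
      · rename_i h
        simp only [List.any_eq_true, List.isPrefixOf_iff_prefix] at h
        push Not at h
        rw [ih]
        constructor
        · rintro ⟨j, p, hp, hpre⟩
          exact ⟨j + 1, p, hp, by simpa [List.drop_succ_cons] using hpre⟩
        · rintro ⟨j, p, hp, hpre⟩
          cases j with
          | zero =>
              simp only [List.drop_zero] at hpre
              exact absurd hpre (h p hp)
          | succ j => exact ⟨j, p, hp, by simpa [List.drop_succ_cons] using hpre⟩

-- ===== VERDICT (by name: the statement is the Claim_ definition above) =====
theorem looks_like_people_answer_py_spec : Claim_equal_looks_like_people_answer_py := by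
  intro text _
  unfold Spec_looks_like_people_answer_py looks_like_people_answer_py looks_like_people_answer_py_alt pvNorm
  rw [Bool.eq_iff_iff]
  rw [pvScan_iff]
  simp only [List.any_eq_true, PySem.Str.isIn_eq,
    ← PySem.Chars.exists_prefix_drop_iff_isIn]
  constructor
  · rintro ⟨p, hp, j, hpre⟩; exact ⟨j, p, hp, hpre⟩
  · rintro ⟨j, p, hp, hpre⟩; exact ⟨p, hp, j, hpre⟩
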